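-- pv_equiv track=rewrite | github.com/cimini-xyz/ssg1 | ssg1.py | truncate_filename
-- ===== SOURCE A (Python) =====
-- def truncate_filename(filename):
--     if (string_len := len(filename)) > 240:
--         split = filename.split("-")
--         split_index = len(split) - 1
--
--         if split_index == 0 or len(split[0]) > 240:
--             filename = filename[:240]
--         else:
--             c_count = 0
--             while split_index and string_len - c_count > 240:
--                 c_count += len(split[split_index])
--                 c_count += int(split_index > 0)
--                 split_index = max(0, split_index - 1)
--             filename = "-".join(split[0:split_index + 1])
--     return filename
-- ===== SOURCE B (Python) =====
-- def truncate_filename(filename):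
--     if len(filename) <= 240:
--         return filename
--     parts = filename.split("-")
--     if len(parts) == 1 or len(parts[0]) > 240:
--         return filename[:240]
--     kept = [parts[0]]
--     length = len(parts[0])
--     for seg in parts[1:]:
--         tentative = length + 1 + len(seg)
--         if tentative > 240:
--             break
--         kept.append(seg)
--         length = tentative
--     return "-".join(kept)
-- ===== Notes on version B (the rewrite author's own statement) =====
-- stated objective: alternative
-- what changed: B builds the kept prefix forward, appending each segment while a running length stays within 240, instead of A's backward loop that subtracts trailing segment lengths from the total until it fits.
import Mathlib
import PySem

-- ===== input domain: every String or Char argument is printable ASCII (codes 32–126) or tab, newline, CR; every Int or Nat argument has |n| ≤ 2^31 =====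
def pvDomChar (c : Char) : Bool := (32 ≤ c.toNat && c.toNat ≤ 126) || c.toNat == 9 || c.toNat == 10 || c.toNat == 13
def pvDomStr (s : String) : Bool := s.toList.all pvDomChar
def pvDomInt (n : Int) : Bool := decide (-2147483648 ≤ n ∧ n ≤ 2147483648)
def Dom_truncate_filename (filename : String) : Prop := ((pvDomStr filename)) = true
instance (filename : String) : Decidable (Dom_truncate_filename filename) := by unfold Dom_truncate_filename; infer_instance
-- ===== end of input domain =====

-- B rebuilds the kept prefix front-to-back with a running length instead of A's back-to-front
-- subtraction from the total length; return values are proved equal on every input (alternative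
-- decomposition, same asymptotic cost).

-- ===== PORT A =====
-- the while loop of A: split_index counts down, c_count accumulates removed characters
def truncA_loop (split : List String) (string_len : Int) : Nat → Int → Nat
  | 0, _c => 0
  | k+1, c =>
      if string_len - c > 240 then
        truncA_loop split string_len k
          (c + PySem.Str.len (PySem.List.pyGetD split ((k : Int)+1) "")
             + (if (0 : Int) < (k : Int)+1 then 1 else 0))
      else k+1

def truncate_filename (filename : String) : String :=
  let string_len := PySem.Str.len filename
  if string_len > 240 then
    let split := (PySem.Str.split? filename "-").getD []
    let split_index := split.length - 1
    if split_index = 0 ∨ PySem.Str.len (PySem.List.pyGetD split 0 "") > 240 then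
      PySem.Str.slice filename none (some 240)
    else
      let r := truncA_loop split string_len split_index 0
      PySem.Str.join "-" (PySem.List.slice split (some 0) (some ((r : Int)+1)))
  else filename

-- ===== PORT B =====
def truncB_loop : List String → Int → List String → List String
  | [], _length, kept => kept
  | seg :: rest, length, kept =>
      let tentative := length + 1 + PySem.Str.len seg
      if tentative > 240 then kept
      else truncB_loop rest tentative (kept ++ [seg])

def truncate_filename_alt (filename : String) : String :=
  if PySem.Str.len filename ≤ 240 then filename
  else
    let parts := (PySem.Str.split? filename "-").getD []
    if parts.length = 1 ∨ PySem.Str.len (parts.headD "") > 240 then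
      PySem.Str.slice filename none (some 240)
    else
      PySem.Str.join "-" (truncB_loop parts.tail (PySem.Str.len (parts.headD "")) [parts.headD ""])


-- ===== PRECONDITION & SPEC =====
def Spec_truncate_filename (filename : String) (out : String) : Prop := out = truncate_filename_alt filename
instance (filename : String) (out : String) : Decidable (Spec_truncate_filename filename out) := by unfold Spec_truncate_filename; infer_instance

-- ===== CLAIM (what is proved, stated in full; the proofs are below) =====
def Claim_equal_truncate_filename : Prop := ∀ (filename : String), Dom_truncate_filename filename → Spec_truncate_filename filename (truncate_filename filename)

-- ===== LEMMAS AND PROOFS =====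
theorem join_append_singleton (sep y : List Char) (xs : List (List Char)) (h : xs ≠ []) :
    PySem.Chars.join sep (xs ++ [y]) = PySem.Chars.join sep xs ++ sep ++ y := by
  induction xs with
  | nil => exact absurd rfl h
  | cons a t ih =>
    cases t with
    | nil => simp [PySem.Chars.join_cons_cons, PySem.Chars.join_singleton]
    | cons b t2 =>
      have h2 := ih (by simp)
      simp only [List.cons_append, PySem.Chars.join_cons_cons] at *
      rw [h2]; simp

theorem join_snoc_append (sep y z : List Char) (xs : List (List Char)) :
    PySem.Chars.join sep (xs ++ [y ++ z]) = PySem.Chars.join sep (xs ++ [y]) ++ z := by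
  cases xs with
  | nil => simp [PySem.Chars.join_singleton]
  | cons a t =>
    rw [join_append_singleton _ _ _ (by simp), join_append_singleton _ _ _ (by simp)]
    simp

theorem go_join (sep : List Char) (hsep : sep ≠ []) :
    ∀ (fuel : Nat) (l cur : List Char) (acc : List (List Char)), l.length ≤ fuel →
    PySem.Chars.join sep (PySem.Chars.splitOn.go sep fuel l cur acc) =
      PySem.Chars.join sep (acc.reverse ++ [cur.reverse]) ++ l := by
  intro fuel
  induction fuel with
  | zero =>
    intro l cur acc hl
    have : l = [] := List.eq_nil_of_length_eq_zero (Nat.le_zero.mp hl)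
    subst this
    simp [PySem.Chars.splitOn.go]
  | succ f ih =>
    intro l cur acc hl
    cases l with
    | nil => simp [PySem.Chars.splitOn.go]
    | cons c rest =>
      rw [PySem.Chars.splitOn.go]
      by_cases hp : sep.isPrefixOf (c :: rest) = true
      · simp only [hp, if_true]
        have hpre : sep <+: (c :: rest) := List.isPrefixOf_iff_prefix.mp hp
        have hdl : (List.drop sep.length (c :: rest)).length ≤ f := by
          have hs1 : 1 ≤ sep.length := by
            cases sep with | nil => exact absurd rfl hsep | cons _ _ => simp
          simp only [List.length_drop, List.length_cons] at *
          omega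
        rw [ih _ _ _ hdl]
        have hl2 : (c :: rest) = sep ++ List.drop sep.length (c :: rest) := by
          obtain ⟨t, ht⟩ := hpre
          conv_lhs => rw [← ht]
          rw [← ht]
          simp
        conv_rhs => rw [hl2]
        simp only [List.reverse_cons, List.reverse_nil]
        rw [← List.append_assoc]
        rw [show acc.reverse ++ [cur.reverse] ++ [([] : List Char)] = (acc.reverse ++ [cur.reverse]) ++ [[] ++ ([] : List Char)] by simp]
        rw [join_snoc_append]
        rw [join_append_singleton _ _ _ (by simp)]
        simp
      · rw [if_neg hp]
        rw [ih _ _ _ (by simpa using Nat.le_of_succ_le_succ (by simpa using hl))]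
        simp only [List.reverse_cons]
        rw [show cur.reverse ++ [c] = cur.reverse ++ [c] from rfl]
        rw [join_snoc_append]
        simp

theorem join_splitOn (sep l : List Char) (hsep : sep ≠ []) :
    PySem.Chars.join sep (PySem.Chars.splitOn l sep) = l := by
  unfold PySem.Chars.splitOn
  rw [go_join sep hsep _ _ _ _ (by omega)]
  simp [PySem.Chars.join_singleton]

theorem go_ne_nil (sep : List Char) :
    ∀ (fuel : Nat) (l cur : List Char) (acc : List (List Char)),
    PySem.Chars.splitOn.go sep fuel l cur acc ≠ [] := by
  intro fuel
  induction fuel with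
  | zero => intro l cur acc; simp [PySem.Chars.splitOn.go]
  | succ f ih =>
    intro l cur acc
    cases l with
    | nil => simp [PySem.Chars.splitOn.go]
    | cons c rest =>
      rw [PySem.Chars.splitOn.go]
      by_cases hp : sep.isPrefixOf (c :: rest) = true
      · simp only [hp, if_true]; exact ih _ _ _
      · rw [if_neg hp]; exact ih _ _ _

theorem splitOn_ne_nil (sep l : List Char) : PySem.Chars.splitOn l sep ≠ [] := go_ne_nil _ _ _ _ _
theorem join_length (sep : List Char) (xs : List (List Char)) (h : xs ≠ []) :
    (PySem.Chars.join sep xs).length = (xs.map List.length).sum + sep.length * (xs.length - 1) := by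
  induction xs with
  | nil => exact absurd rfl h
  | cons a t ih =>
    cases t with
    | nil => simp [PySem.Chars.join_singleton]
    | cons b t2 =>
      rw [PySem.Chars.join_cons_cons]
      have h2 := ih (by simp)
      simp only [List.length_append, h2, List.map_cons, List.sum_cons, List.length_cons,
        Nat.add_sub_cancel, Nat.mul_succ]
      omega

def slen (x : String) : Nat := x.toList.length

def jlen (parts : List String) (m : Nat) : Nat := ((parts.take m).map slen).sum + (m - 1)

def gcount : List String → Int → Nat
  | [], _ => 0
  | seg :: rs, len =>
      if len + 1 + PySem.Str.len seg > 240 then 0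
      else 1 + gcount rs (len + 1 + PySem.Str.len seg)

def Pm (parts : List String) (m : Nat) : Prop :=
  1 ≤ m ∧ m ≤ parts.length ∧ jlen parts m ≤ 240 ∧
    ∀ j, m < j → j ≤ parts.length → 240 < jlen parts j

theorem jlen_step (parts : List String) (m : Nat) (hm : 1 ≤ m) (hn : m < parts.length) :
    jlen parts (m+1) = jlen parts m + 1 + slen (parts.getD m "") := by
  unfold jlen
  rw [List.take_add_one]
  have h1 : parts[m]? = some parts[m] := List.getElem?_eq_getElem hn
  have h2 : parts.getD m "" = parts[m] := List.getD_eq_getElem parts "" hn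
  rw [h1, h2]
  simp only [Option.toList_some, List.map_append, List.map_cons, List.map_nil,
    List.sum_append, List.sum_cons, List.sum_nil]
  omega

theorem jlen_mono (parts : List String) (a b : Nat) (ha : 1 ≤ a) (hab : a ≤ b)
    (hb : b ≤ parts.length) : jlen parts a ≤ jlen parts b := by
  induction b, hab using Nat.le_induction with
  | base => exact le_refl _
  | succ b hab ih =>
    have h1 : jlen parts b ≤ jlen parts (b+1) := by
      rw [jlen_step parts b (le_trans ha hab) (by omega)]
      omega
    exact le_trans (ih (by omega)) h1

theorem bLoop_eq (rest : List String) : ∀ (len : Int) (kept : List String),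
    truncB_loop rest len kept = kept ++ rest.take (gcount rest len) := by
  induction rest with
  | nil => intro len kept; simp [truncB_loop, gcount]
  | cons seg rs ih =>
    intro len kept
    rw [truncB_loop, gcount]
    by_cases h : len + 1 + PySem.Str.len seg > 240
    · rw [if_pos h, if_pos h]; simp
    · rw [if_neg h, if_neg h, ih]
      rw [Nat.add_comm 1 (gcount rs _), List.take_succ_cons]
      simp

theorem Pm_unique (parts : List String) (m1 m2 : Nat) (h1 : Pm parts m1) (h2 : Pm parts m2) :
    m1 = m2 := by
  obtain ⟨h11, h12, h13, h14⟩ := h1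
  obtain ⟨h21, h22, h23, h24⟩ := h2
  rcases Nat.lt_trichotomy m1 m2 with h | h | h
  · exact absurd (h14 m2 h h22) (by omega)
  · exact h
  · exact absurd (h24 m1 h h12) (by omega)

theorem gcount_spec (parts : List String) : ∀ (rs : List String) (m : Nat),
    1 ≤ m → m + rs.length = parts.length → rs = parts.drop m → jlen parts m ≤ 240 →
    Pm parts (m + gcount rs ((jlen parts m : Nat) : Int)) := by
  intro rs
  induction rs with
  | nil =>
    intro m hm hlen _hdrop hle
    simp only [List.length_nil, Nat.add_zero] at hlen
    rw [gcount]
    exact ⟨by omega, by omega, by simpa using hle, by omega⟩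
  | cons seg rs' ih =>
    intro m hm hlen hdrop hle
    have hmn : m < parts.length := by
      simp only [List.length_cons] at hlen; omega
    have hseg : parts.getD m "" = seg := by
      have this := (List.head?_drop (l := parts) (i := m)).symm
      rw [← hdrop] at this
      replace this := this.symm
      simp only [List.head?_cons] at this
      simp [List.getD, ← this]
    have hrs' : rs' = parts.drop (m+1) := by
      have : (parts.drop m).tail = parts.drop (m + 1) := by
        rw [← List.drop_drop]; simp
      rw [← this, ← hdrop]
      simp
    have hstep : jlen parts (m+1) = jlen parts m + 1 + slen seg := by
      rw [jlen_step parts m hm hmn, hseg]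
    have hlenseg : PySem.Str.len seg = (slen seg : Int) := rfl
    rw [gcount]
    by_cases hc : ((jlen parts m : Nat) : Int) + 1 + PySem.Str.len seg > 240
    · rw [if_pos hc]
      refine ⟨hm, by omega, hle, ?_⟩
      intro j hj hjn
      have h2 : 240 < jlen parts (m+1) := by
        rw [hlenseg] at hc; omega
      calc 240 < jlen parts (m+1) := h2
        _ ≤ jlen parts j := jlen_mono parts (m+1) j (by omega) (by omega) hjn
    · rw [if_neg hc]
      have hc' : jlen parts (m+1) ≤ 240 := by
        rw [hlenseg] at hc; omega
      have harg : ((jlen parts m : Nat) : Int) + 1 + PySem.Str.len seg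
          = ((jlen parts (m+1) : Nat) : Int) := by
        rw [hlenseg, hstep]; push_cast; ring
      rw [harg]
      have := ih (m+1) (by omega) (by simp only [List.length_cons] at hlen; omega) hrs' hc'
      have heq : m + (1 + gcount rs' ((jlen parts (m+1) : Nat) : Int))
          = (m+1) + gcount rs' ((jlen parts (m+1) : Nat) : Int) := by omega
      rw [heq]
      exact this

theorem aLoop_spec (parts : List String) (h1 : jlen parts 1 ≤ 240) :
    ∀ (k : Nat) (c : Int), k + 1 ≤ parts.length →
    c = ((jlen parts parts.length : Nat) : Int) - ((jlen parts (k+1) : Nat) : Int) →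
    (∀ j, k+1 < j → j ≤ parts.length → 240 < jlen parts j) →
    Pm parts (truncA_loop parts ((jlen parts parts.length : Nat) : Int) k c + 1) := by
  intro k
  induction k with
  | zero =>
    intro c hk _hc hj
    rw [truncA_loop]
    exact ⟨le_refl 1, hk, h1, hj⟩
  | succ k ih =>
    intro c hk hc hj'
    rw [truncA_loop]
    have hidx : ((k : Int) + 1) = ((k+1 : Nat) : Int) := by push_cast; ring
    by_cases hcond : ((jlen parts parts.length : Nat) : Int) - c > 240
    · rw [if_pos hcond]
      have hkn : k + 1 < parts.length := by omega
      have hget : PySem.List.pyGetD parts ((k : Int)+1) "" = parts.getD (k+1) "" := by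
        rw [hidx, PySem.List.pyGetD_natCast]
      have hone : (if (0 : Int) < (k : Int)+1 then (1 : Int) else 0) = 1 := by
        rw [if_pos (by positivity)]
      have hstepZ : ((jlen parts (k+1+1) : Nat) : Int)
          = ((jlen parts (k+1) : Nat) : Int) + 1 + PySem.Str.len (parts.getD (k+1) "") := by
        have hstep : jlen parts (k+1+1) = jlen parts (k+1) + 1 + slen (parts.getD (k+1) "") :=
          jlen_step parts (k+1) (by omega) hkn
        have hleng : PySem.Str.len (parts.getD (k+1) "") = (slen (parts.getD (k+1) "") : Int) := rfl
        rw [hleng, hstep]; push_cast; ring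
      have hc' : c + PySem.Str.len (PySem.List.pyGetD parts ((k : Int)+1) "")
            + (if (0 : Int) < (k : Int)+1 then 1 else 0)
          = ((jlen parts parts.length : Nat) : Int) - ((jlen parts (k+1) : Nat) : Int) := by
        rw [hget, hone, hc]
        omega
      refine ih _ (by omega) hc' ?_
      intro j hj hjn
      rcases Nat.lt_or_ge j (k+1+1+1) with hlt | hge
      · have hje : j = k+1+1 := by omega
        subst hje
        rw [hc] at hcond
        have hmono : jlen parts (k+1+1) ≤ jlen parts parts.length :=
          jlen_mono parts (k+1+1) parts.length (by omega) (by omega) (le_refl _)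
        omega
      · exact hj' j (by omega) hjn
    · rw [if_neg hcond]
      refine ⟨by omega, hk, ?_, ?_⟩
      · rw [hc] at hcond
        omega
      · intro j hjlt hjn
        exact hj' j (by omega) hjn

theorem ports_agree (filename : String) :
    truncate_filename filename = truncate_filename_alt filename := by
  rw [truncate_filename, truncate_filename_alt]
  by_cases h240 : PySem.Str.len filename ≤ 240
  · rw [if_neg (by omega), if_pos h240]
  · rw [if_pos (by omega), if_neg h240]
    have hsplit : PySem.Str.split? filename "-" =
        some ((PySem.Chars.splitOn filename.toList ['-']).map String.ofList) := by
      simp [PySem.Str.split?, PySem.Chars.split?]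
    rw [hsplit]
    simp only [Option.getD_some]
    set parts := (PySem.Chars.splitOn filename.toList ['-']).map String.ofList with hpartsdef
    have hne : parts ≠ [] := by
      simp only [hpartsdef, ne_eq, List.map_eq_nil_iff]
      exact splitOn_ne_nil _ _
    -- total length identity
    have hjoin : PySem.Chars.join ['-'] (PySem.Chars.splitOn filename.toList ['-'])
        = filename.toList := join_splitOn ['-'] filename.toList (by simp)
    have hmapback : parts.map String.toList = PySem.Chars.splitOn filename.toList ['-'] := by
      simp [hpartsdef, List.map_map, Function.comp_def]
    have hsum : filename.toList.length = jlen parts parts.length := by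
      have hlen := join_length ['-'] (PySem.Chars.splitOn filename.toList ['-'])
        (splitOn_ne_nil _ _)
      rw [hjoin, ← hmapback] at hlen
      unfold jlen
      rw [List.take_of_length_le (le_refl _), hlen]
      have hml : List.map List.length (List.map String.toList parts) = List.map slen parts := by
        rw [List.map_map]; rfl
      rw [hml]
      simp
    by_cases hguard : parts.length = 1 ∨ PySem.Str.len (parts.headD "") > 240
    · have hAg : parts.length - 1 = 0 ∨ PySem.Str.len (PySem.List.pyGetD parts 0 "") > 240 := by
        obtain ⟨p, t, hpt⟩ := List.exists_cons_of_ne_nil hne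
        rcases hguard with hg | hg
        · left; omega
        · right; rw [hpt] at hg ⊢; simpa [PySem.List.pyGetD] using hg
      rw [if_pos hAg, if_pos hguard]
    · have hAg : ¬(parts.length - 1 = 0 ∨ PySem.Str.len (PySem.List.pyGetD parts 0 "") > 240) := by
        push Not at hguard ⊢
        obtain ⟨p, t, hpt⟩ := List.exists_cons_of_ne_nil hne
        rw [hpt] at hguard ⊢
        refine ⟨?_, ?_⟩
        · simp only [List.length_cons] at hguard ⊢; omega
        · simpa [PySem.List.pyGetD] using hguard.2
      rw [if_neg hAg, if_neg hguard]
      push Not at hguard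
      obtain ⟨p, t, hpt⟩ := List.exists_cons_of_ne_nil hne
      have hn2 : 2 ≤ parts.length := by
        have h1 : 1 ≤ parts.length := by
          rw [hpt]; simp
        omega
      have hp0 : PySem.Str.len (parts.headD "") ≤ 240 := hguard.2
      have hj1 : jlen parts 1 = slen (parts.headD "") := by
        rw [hpt]
        simp [jlen, List.take_succ_cons]
      have h1le : jlen parts 1 ≤ 240 := by
        have : PySem.Str.len (parts.headD "") = (slen (parts.headD "") : Int) := rfl
        rw [this] at hp0
        omega
      -- characterize the A-side loop result
      have hA : Pm parts (truncA_loop parts (PySem.Str.len filename) (parts.length - 1) 0 + 1) := by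
        have hsl : PySem.Str.len filename = ((jlen parts parts.length : Nat) : Int) := by
          have : PySem.Str.len filename = (filename.toList.length : Int) := rfl
          rw [this, hsum]
        rw [hsl]
        have hidx : parts.length - 1 + 1 = parts.length := by omega
        have := aLoop_spec parts h1le (parts.length - 1) 0 (by omega)
          (by rw [hidx]; ring) (by intro j hj hjn; omega)
        exact this
      -- characterize the B-side loop result
      have hBspec : Pm parts (1 + gcount parts.tail ((jlen parts 1 : Nat) : Int)) := by
        refine gcount_spec parts parts.tail 1 (le_refl 1) ?_ ?_ h1le
        · rw [hpt]; simp only [List.length_cons, List.tail_cons]; omega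
        · rw [hpt]; simp
      have hMeq : truncA_loop parts (PySem.Str.len filename) (parts.length - 1) 0 + 1
          = 1 + gcount parts.tail ((jlen parts 1 : Nat) : Int) := Pm_unique parts _ _ hA hBspec
      -- rewrite both result lists to takes
      have hslice : PySem.List.slice parts (some 0)
          (some ((truncA_loop parts (PySem.Str.len filename) (parts.length - 1) 0 : Int)+1))
          = parts.take (truncA_loop parts (PySem.Str.len filename) (parts.length - 1) 0 + 1) := by
        rw [PySem.List.slice_zero_start]
        have h : ((truncA_loop parts (PySem.Str.len filename) (parts.length - 1) 0 : Int) + 1)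
            = ((truncA_loop parts (PySem.Str.len filename) (parts.length - 1) 0 + 1 : Nat) : Int) := by
          push_cast; ring
        rw [h, PySem.List.slice_to_natCast]
      have hBlen : PySem.Str.len (parts.headD "") = ((jlen parts 1 : Nat) : Int) := by
        have : PySem.Str.len (parts.headD "") = (slen (parts.headD "") : Int) := rfl
        rw [this, hj1]
      rw [hslice, hBlen, bLoop_eq, hMeq]
      congr 1
      rw [hpt]
      simp [List.take_succ_cons, Nat.add_comm 1 (gcount _ _)]

-- ===== VERDICT (by name: the statement is the Claim_ definition above) =====
theorem truncate_filename_spec : Claim_equal_truncate_filename := by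
  intro filename _
  unfold Spec_truncate_filename
  exact ports_agree filename
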